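-- pv_equiv track=rewrite | github.com/Shorefeesh/VRTrainer | logic/trainer/proximity.py | _normalise_text
-- ===== SOURCE A (Python) =====
-- from typing import Iterable, List, Optional
--
-- def _normalise_text(text: str) -> str:
--     if not text:
--         return ""
--
--     chars: List[str] = []
--     for ch in text.lower():
--         if ch.isalnum():
--             chars.append(ch)
--         elif ch.isspace():
--             chars.append(" ")
--         else:
--             chars.append(" ")
--
--     return " ".join("".join(chars).split())
-- ===== SOURCE B (Python) =====
-- def _normalise_text(text: str) -> str:
--     if not text:
--         return ""
--
--     words = []
--     buf = []
--     for ch in text.lower():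
--         if ch.isalnum():
--             buf.append(ch)
--         elif buf:
--             words.append("".join(buf))
--             buf = []
--     if buf:
--         words.append("".join(buf))
--     return " ".join(words)
-- ===== Notes on version B (the rewrite author's own statement) =====
-- stated objective: simpler
-- what changed: B builds the words directly in one pass with a current-word buffer flushed on non-alphanumeric characters, instead of mapping every character to itself-or-space, joining to a string and re-splitting it.
import Mathlib
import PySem

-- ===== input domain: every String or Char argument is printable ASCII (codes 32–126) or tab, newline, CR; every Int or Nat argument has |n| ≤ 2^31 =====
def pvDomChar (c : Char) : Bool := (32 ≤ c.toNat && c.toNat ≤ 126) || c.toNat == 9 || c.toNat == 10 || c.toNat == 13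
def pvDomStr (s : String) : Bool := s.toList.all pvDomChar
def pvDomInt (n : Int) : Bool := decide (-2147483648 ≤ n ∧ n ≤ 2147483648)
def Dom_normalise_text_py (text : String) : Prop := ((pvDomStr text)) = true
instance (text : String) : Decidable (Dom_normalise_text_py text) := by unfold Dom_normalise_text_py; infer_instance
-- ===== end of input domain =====

-- B replaces A's map-to-spaces-then-split pipeline by a single pass that accumulates each
-- word in a buffer and flushes it on non-alphanumeric characters (objective: simpler).

-- ===== PORT A =====
-- chars is Python's list of 1-char strings; "".join(chars) is exactly this List Char.
def normalise_text_py (text : String) : String :=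
  if text.toList = [] then ""
  else
    let chars : List Char :=
      (PySem.Chars.lower text.toList).foldl
        (fun acc ch =>
          if PySem.Chars.isalnum ch then acc ++ [ch]
          else if PySem.Chars.isspace ch then acc ++ [' ']
          else acc ++ [' ']) []
    String.mk (PySem.Chars.join [' '] (PySem.Chars.split₀ chars))

-- ===== PORT B =====
-- the for-loop of Source B over (words, buf)
def pvAltLoop : List Char → List (List Char) → List Char → List (List Char) × List Char
  | [], words, buf => (words, buf)
  | c :: cs, words, buf =>
    if PySem.Chars.isalnum c then pvAltLoop cs words (buf ++ [c])
    else if !buf.isEmpty then pvAltLoop cs (words ++ [buf]) []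
    else pvAltLoop cs words buf

def normalise_text_py_alt (text : String) : String :=
  if text.toList = [] then ""
  else
    let r := pvAltLoop (PySem.Chars.lower text.toList) [] []
    let words := if !r.2.isEmpty then r.1 ++ [r.2] else r.1
    String.mk (PySem.Chars.join [' '] words)

-- ===== PRECONDITION & SPEC =====
def Spec_normalise_text_py (text : String) (out : String) : Prop := out = normalise_text_py_alt text
instance (text : String) (out : String) : Decidable (Spec_normalise_text_py text out) := by unfold Spec_normalise_text_py; infer_instance

-- ===== CLAIM (what is proved, stated in full; the proofs are below) =====
def Claim_equal_normalise_text_py : Prop := ∀ (text : String), Dom_normalise_text_py text → Spec_normalise_text_py text (normalise_text_py text)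

-- ===== LEMMAS AND PROOFS =====

-- an alphanumeric character is never whitespace
theorem pv_alnum_not_space (c : Char) (h : PySem.Chars.isalnum c = true) :
    PySem.Chars.isspace c = false := by
  simp only [PySem.Chars.isalnum, PySem.Chars.isalpha, PySem.Chars.isdigit, PySem.Chars.isupper,
    PySem.Chars.islower, Bool.or_eq_true, Bool.and_eq_true, decide_eq_true_eq, Char.le_def,
    UInt32.le_iff_toNat_le] at h
  simp only [PySem.Chars.isspace, Char.toNat]
  simp only [Bool.or_eq_false_iff, decide_eq_false_iff_not, Bool.and_eq_false_iff]
  have h1 : 'A'.val.toNat = 65 := rfl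
  have h2 : 'Z'.val.toNat = 90 := rfl
  have h3 : 'a'.val.toNat = 97 := rfl
  have h4 : 'z'.val.toNat = 122 := rfl
  have h5 : '0'.val.toNat = 48 := rfl
  have h6 : '9'.val.toNat = 57 := rfl
  omega

-- A's character substitution as a function
def pvSub (c : Char) : Char := if PySem.Chars.isalnum c then c else ' '

-- A's foldl builds exactly the map of pvSub
theorem pv_fold_eq_map (cs : List Char) (acc : List Char) :
    cs.foldl
      (fun acc ch =>
        if PySem.Chars.isalnum ch then acc ++ [ch]
        else if PySem.Chars.isspace ch then acc ++ [' ']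
        else acc ++ [' ']) acc = acc ++ cs.map pvSub := by
  have hf : (fun (a : List Char) ch =>
      if PySem.Chars.isalnum ch then a ++ [ch]
      else if PySem.Chars.isspace ch then a ++ [' ']
      else a ++ [' ']) = (fun (a : List Char) ch => a ++ [pvSub ch]) := by
    funext a ch
    by_cases h : PySem.Chars.isalnum ch = true
    · simp [h, pvSub]
    · by_cases hs : PySem.Chars.isspace ch = true <;> simp [h, hs, pvSub]
  rw [hf]
  induction cs generalizing acc with
  | nil => simp
  | cons c cs ih => simp [ih]

-- the invariant tying split₀'s scan of the substituted string to B's word loop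
theorem pv_go_eq_loop (cs : List Char) (ws : List (List Char)) (buf : List Char) :
    PySem.Chars.split₀.go (cs.map pvSub) buf.reverse ws.reverse =
      (if !(pvAltLoop cs ws buf).2.isEmpty
       then (pvAltLoop cs ws buf).1 ++ [(pvAltLoop cs ws buf).2]
       else (pvAltLoop cs ws buf).1) := by
  induction cs generalizing ws buf with
  | nil =>
    simp only [List.map_nil, PySem.Chars.split₀.go, pvAltLoop]
    cases buf with
    | nil => simp
    | cons b bs => simp
  | cons c cs ih =>
    simp only [List.map_cons, pvAltLoop]
    by_cases h : PySem.Chars.isalnum c = true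
    · have hns := pv_alnum_not_space c h
      have hsub : pvSub c = c := by simp [pvSub, h]
      rw [hsub]
      simp only [PySem.Chars.split₀.go, hns, Bool.false_eq_true, if_false, h, if_true]
      have hrev : c :: buf.reverse = (buf ++ [c]).reverse := by simp
      rw [hrev, ih]
    · have hsub : pvSub c = ' ' := by simp [pvSub, h]
      have hsp : PySem.Chars.isspace ' ' = true := by decide
      rw [hsub]
      simp only [PySem.Chars.split₀.go, hsp, if_true, h, Bool.false_eq_true, if_false]
      cases buf with
      | nil =>
        simp only [List.reverse_nil, List.isEmpty_nil, if_true, Bool.not_false]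
        have := ih ws []
        simpa using this
      | cons b bs =>
        have hne : ((b :: bs).reverse).isEmpty = false := by simp
        rw [hne]
        simp only [Bool.false_eq_true, if_false, List.isEmpty_cons, Bool.not_false, if_true]
        have hrev : (b :: bs).reverse.reverse :: ws.reverse = (ws ++ [b :: bs]).reverse := by simp
        rw [hrev]
        have := ih (ws ++ [b :: bs]) []
        simpa using this

-- ===== VERDICT (by name: the statement is the Claim_ definition above) =====
theorem normalise_text_py_spec : Claim_equal_normalise_text_py := by
  intro text _
  unfold Spec_normalise_text_py normalise_text_py normalise_text_py_alt
  by_cases h : text.toList = []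
  · simp [h]
  · simp only [h, if_false]
    rw [pv_fold_eq_map]
    simp only [List.nil_append]
    have := pv_go_eq_loop (PySem.Chars.lower text.toList) [] []
    simp only [List.reverse_nil] at this
    rw [PySem.Chars.split₀, this]
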